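-- pv_equiv track=rewrite | github.com/KingOfTheAce2/BEAR_AI | installer/BEAR_AI_Portable/src/bear_ai/engines/optimization_engine.py | _find_hardware_optimal_batch_size
-- ===== SOURCE A (Python) =====
-- def _find_hardware_optimal_batch_size(max_batch_size: int) -> int:
--     """Find batch size optimal for hardware utilization"""
--     # Prefer powers of 2 or multiples of 8 for better GPU utilization
--     optimal_sizes = []
--
--     # Powers of 2
--     power = 1
--     while power <= max_batch_size:
--         optimal_sizes.append(power)
--         power *= 2
--
--     # Multiples of 8
--     multiple = 8
--     while multiple <= max_batch_size:
--         if multiple not in optimal_sizes: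
--             optimal_sizes.append(multiple)
--         multiple += 8
--
--     # Return largest optimal size
--     return max(optimal_sizes) if optimal_sizes else 1
-- ===== SOURCE B (Python) =====
-- def _find_hardware_optimal_batch_size(max_batch_size: int) -> int:
--     """Find batch size optimal for hardware utilization (closed form)."""
--     if max_batch_size >= 8:
--         return (max_batch_size // 8) * 8
--     if max_batch_size >= 4:
--         return 4
--     if max_batch_size >= 2:
--         return 2
--     return 1
-- ===== Notes on version B (the rewrite author's own statement) =====
-- stated objective: faster
-- what changed: Replaced the two enumeration loops (all powers of 2 and all multiples of 8 up to max) plus a final max() with a direct closed-form case split: (n//8)*8 for n>=8, else the largest power of 2 <= n, else 1.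
import Mathlib
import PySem

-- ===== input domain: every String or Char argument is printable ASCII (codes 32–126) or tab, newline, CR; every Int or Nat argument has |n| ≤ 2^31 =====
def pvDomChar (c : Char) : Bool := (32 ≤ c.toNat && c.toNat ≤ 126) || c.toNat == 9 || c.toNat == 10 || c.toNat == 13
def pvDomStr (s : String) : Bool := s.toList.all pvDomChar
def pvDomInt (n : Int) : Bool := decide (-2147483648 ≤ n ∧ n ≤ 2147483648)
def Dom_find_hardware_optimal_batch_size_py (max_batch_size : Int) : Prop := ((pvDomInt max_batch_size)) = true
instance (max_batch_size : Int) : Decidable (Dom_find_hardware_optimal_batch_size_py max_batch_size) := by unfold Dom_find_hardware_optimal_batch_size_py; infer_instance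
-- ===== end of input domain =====

-- B replaces A's two enumeration loops + max() with a direct closed-form case split (same value everywhere).

-- ===== PORT A =====
-- `while power <= max_batch_size: optimal_sizes.append(power); power *= 2`  (the `0 < power`
-- conjunct only makes the recursion total; from the actual start value 1 it always holds,
-- so the behaviour is unchanged)
def pvPowersLoop (n : Int) (power : Int) (acc : List Int) : List Int :=
  if _h : 0 < power ∧ power ≤ n then pvPowersLoop n (power * 2) (acc ++ [power]) else acc
termination_by (n + 1 - power).toNat
decreasing_by omega

-- `while multiple <= max_batch_size: if multiple not in optimal_sizes: append; multiple += 8`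
def pvMultsLoop (n : Int) (multiple : Int) (acc : List Int) : List Int :=
  if _h : multiple ≤ n then
    pvMultsLoop n (multiple + 8) (if multiple ∈ acc then acc else acc ++ [multiple])
  else acc
termination_by (n + 8 - multiple).toNat
decreasing_by omega

def find_hardware_optimal_batch_size_py (max_batch_size : Int) : Int :=
  let optimal_sizes := pvMultsLoop max_batch_size 8 (pvPowersLoop max_batch_size 1 [])
  -- `max(optimal_sizes) if optimal_sizes else 1` : max? is none exactly on the empty list
  match PySem.List.max? optimal_sizes (fun x => x) with
  | some m => m
  | none => 1

-- ===== PORT B =====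
def find_hardware_optimal_batch_size_py_alt (max_batch_size : Int) : Int :=
  if 8 ≤ max_batch_size then PySem.Int.floordiv max_batch_size 8 * 8
  else if 4 ≤ max_batch_size then 4
  else if 2 ≤ max_batch_size then 2
  else 1

-- ===== PRECONDITION & SPEC =====
def Spec_find_hardware_optimal_batch_size_py (max_batch_size : Int) (out : Int) : Prop := out = find_hardware_optimal_batch_size_py_alt max_batch_size
instance (max_batch_size : Int) (out : Int) : Decidable (Spec_find_hardware_optimal_batch_size_py max_batch_size out) := by unfold Spec_find_hardware_optimal_batch_size_py; infer_instance

-- ===== CLAIM (what is proved, stated in full; the proofs are below) =====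
def Claim_equal_find_hardware_optimal_batch_size_py : Prop := ∀ (max_batch_size : Int), Dom_find_hardware_optimal_batch_size_py max_batch_size → Spec_find_hardware_optimal_batch_size_py max_batch_size (find_hardware_optimal_batch_size_py max_batch_size)

-- ===== LEMMAS AND PROOFS =====

-- everything already accumulated stays in the result of the multiples loop
theorem pvMultsLoop_acc_subset (n multiple : Int) (acc : List Int) :
    ∀ x ∈ acc, x ∈ pvMultsLoop n multiple acc := by
  induction multiple, acc using pvMultsLoop.induct n with
  | case1 m acc h ih =>
    intro x hx
    rw [pvMultsLoop, dif_pos h]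
    apply ih
    split <;> simp [hx]
  | case2 m acc h =>
    intro x hx; rw [pvMultsLoop, dif_neg h]; exact hx

-- if the current multiple is a positive multiple of 8 not exceeding n, then (n/8)*8 — the
-- largest multiple of 8 not exceeding n — ends up in the result
theorem pvMultsLoop_mem_top (n multiple : Int) (acc : List Int)
    (hdvd : (8:Int) ∣ multiple) (hpos : 0 < multiple) (hle : multiple ≤ n) :
    n / 8 * 8 ∈ pvMultsLoop n multiple acc := by
  induction multiple, acc using pvMultsLoop.induct n with
  | case1 m acc h ih =>
    rw [pvMultsLoop, dif_pos h]
    by_cases h2 : m + 8 ≤ n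
    · exact ih (by omega) (by omega) h2
    · have hm : m = n / 8 * 8 := by omega
      apply pvMultsLoop_acc_subset
      subst hm
      split <;> simp_all
  | case2 m acc h => omega

-- every element of the multiples-loop result is ≤ (n/8)*8, provided acc already is
theorem pvMultsLoop_ub (n multiple : Int) (acc : List Int)
    (hdvd : (8:Int) ∣ multiple) (hacc : ∀ y ∈ acc, y ≤ n / 8 * 8) :
    ∀ x ∈ pvMultsLoop n multiple acc, x ≤ n / 8 * 8 := by
  induction multiple, acc using pvMultsLoop.induct n with
  | case1 m acc h ih =>
    rw [pvMultsLoop, dif_pos h]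
    apply ih (by omega)
    intro y hy
    rcases (by split at hy <;> simp_all : y ∈ acc ∨ y = m) with h' | rfl
    · exact hacc y h'
    · omega
  | case2 m acc h =>
    rw [pvMultsLoop, dif_neg h]; exact hacc

-- every element of the powers-loop result is ≤ (n/8)*8 when 8 ≤ n: each appended power is
-- 1, 2 or 4 (< 8 ≤ (n/8)*8) or a multiple of 8 that is ≤ n
theorem pvPowersLoop_ub (n power : Int) (acc : List Int) (hn : 8 ≤ n)
    (hinv : power = 1 ∨ power = 2 ∨ power = 4 ∨ (8:Int) ∣ power)
    (hacc : ∀ y ∈ acc, y ≤ n / 8 * 8) :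
    ∀ x ∈ pvPowersLoop n power acc, x ≤ n / 8 * 8 := by
  induction power, acc using pvPowersLoop.induct n with
  | case1 p acc h ih =>
    rw [pvPowersLoop, dif_pos h]
    apply ih (by rcases hinv with rfl | rfl | rfl | hd <;> omega)
    intro y hy
    rcases List.mem_append.mp hy with h' | h'
    · exact hacc y h'
    · simp only [List.mem_singleton] at h'
      subst h'
      rcases hinv with rfl | rfl | rfl | hd <;> omega
  | case2 p acc h =>
    rw [pvPowersLoop, dif_neg h]; exact hacc

-- concrete evaluations of the powers loop for the small cases 1 ≤ n < 8
theorem pvPowersLoop_eval_1 (n : Int) (h : n = 1) : pvPowersLoop n 1 [] = [1] := by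
  subst h
  rw [pvPowersLoop, dif_pos (by norm_num), pvPowersLoop, dif_neg (by norm_num)]
  rfl
theorem pvPowersLoop_eval_23 (n : Int) (h : 2 ≤ n ∧ n < 4) : pvPowersLoop n 1 [] = [1, 2] := by
  rw [pvPowersLoop, dif_pos (by omega), pvPowersLoop, dif_pos (by omega),
      pvPowersLoop, dif_neg (by omega)]
  rfl
theorem pvPowersLoop_eval_47 (n : Int) (h : 4 ≤ n ∧ n < 8) : pvPowersLoop n 1 [] = [1, 2, 4] := by
  rw [pvPowersLoop, dif_pos (by omega), pvPowersLoop, dif_pos (by omega),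
      pvPowersLoop, dif_pos (by omega), pvPowersLoop, dif_neg (by omega)]
  rfl

-- the multiples loop does nothing when n < 8
theorem pvMultsLoop_eval_small (n : Int) (h : n < 8) (acc : List Int) :
    pvMultsLoop n 8 acc = acc := by
  rw [pvMultsLoop, dif_neg (by omega)]

-- ===== VERDICT (by name: the statement is the Claim_ definition above) =====
theorem find_hardware_optimal_batch_size_py_spec : Claim_equal_find_hardware_optimal_batch_size_py := by
  intro n _
  unfold Spec_find_hardware_optimal_batch_size_py
  by_cases h8 : 8 ≤ n
  · -- large case: the maximum of the enumerated list is (n//8)*8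
    simp only [find_hardware_optimal_batch_size_py, find_hardware_optimal_batch_size_py_alt]
    rw [if_pos h8, PySem.Int.floordiv_eq_ediv_of_pos (by norm_num)]
    have hmem : n / 8 * 8 ∈ pvMultsLoop n 8 (pvPowersLoop n 1 []) :=
      pvMultsLoop_mem_top n 8 _ (by norm_num) (by norm_num) h8
    have hub : ∀ x ∈ pvMultsLoop n 8 (pvPowersLoop n 1 []), x ≤ n / 8 * 8 :=
      pvMultsLoop_ub n 8 _ (by norm_num)
        (pvPowersLoop_ub n 1 [] h8 (by norm_num) (by simp))
    cases hmax : PySem.List.max? (pvMultsLoop n 8 (pvPowersLoop n 1 [])) (fun x => x) with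
    | none =>
      rw [PySem.List.max?_eq_none_iff] at hmax
      simp [hmax] at hmem
    | some m =>
      show m = n / 8 * 8
      have hm1 := PySem.List.max?_mem hmax
      have hm2 := PySem.List.max?_isMax hmax _ hmem
      have := hub m hm1
      omega
  · -- small cases: the list is exactly the powers of 2 up to n (or empty)
    simp only [find_hardware_optimal_batch_size_py, find_hardware_optimal_batch_size_py_alt,
               pvMultsLoop_eval_small n (by omega)]
    rw [if_neg h8]
    by_cases h4 : 4 ≤ n
    · rw [if_pos h4, pvPowersLoop_eval_47 n (by omega)]; decide
    · rw [if_neg h4]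
      by_cases h2 : 2 ≤ n
      · rw [if_pos h2, pvPowersLoop_eval_23 n (by omega)]; decide
      · rw [if_neg h2]
        by_cases h1 : n = 1
        · rw [pvPowersLoop_eval_1 n h1]; decide
        · rw [pvPowersLoop, dif_neg (by omega)]; decide
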